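-- pv_equiv track=rewrite | github.com/laitim2001/ai-semantic-kernel-framework-project | archived/v1-phase1-48/backend/src/domain/orchestration/planning/decision_engine.py | _generate_mitigations
-- ===== SOURCE A (Python) =====
-- from typing import Any, Callable, Dict, List, Optional, Protocol, Tuple
--
-- def _generate_mitigations(cons: List[str]) -> List[str]:
--     """Generate risk mitigation suggestions based on cons."""
--     mitigations = []
--
--     for con in cons:
--         con_lower = con.lower()
--
--         if "time" in con_lower or "slow" in con_lower or "delay" in con_lower:
--             mitigations.append("Set timeout limits and have fallback ready")
--         elif "cost" in con_lower or "expensive" in con_lower or "resource" in con_lower: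
--             mitigations.append("Set budget limits and monitor resource usage")
--         elif "fail" in con_lower or "error" in con_lower or "risk" in con_lower:
--             mitigations.append("Implement retry mechanism with fallback options")
--         elif "complex" in con_lower or "difficult" in con_lower:
--             mitigations.append("Break down into smaller steps with checkpoints")
--         elif "depend" in con_lower or "require" in con_lower:
--             mitigations.append("Verify prerequisites before proceeding")
--         else:
--             mitigations.append(f"Monitor and track: {con}")
--
--     return mitigations
-- ===== SOURCE B (Python) =====
-- _PRIORITY = {
--     "time": 0, "slow": 0, "delay": 0,
--     "cost": 1, "expensive": 1, "resource": 1,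
--     "fail": 2, "error": 2, "risk": 2,
--     "complex": 3, "difficult": 3,
--     "depend": 4, "require": 4,
-- }
--
-- _MESSAGES = [
--     "Set timeout limits and have fallback ready",
--     "Set budget limits and monitor resource usage",
--     "Implement retry mechanism with fallback options",
--     "Break down into smaller steps with checkpoints",
--     "Verify prerequisites before proceeding",
-- ]
--
-- _LENGTHS = [4, 5, 6, 7, 8, 9]  # the distinct keyword lengths
--
--
-- def _generate_mitigations(cons):
--     """Generate risk mitigation suggestions based on cons.
--
--     Instead of testing each keyword against the string, enumerate the
--     substrings of each con (at the keyword lengths) and look them up in a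
--     hash table mapping keyword -> rule priority; the smallest priority found
--     wins, matching the original chain's rule order.
--     """
--     out = []
--     for con in cons:
--         low = con.lower()
--         cands = [low[i:i + n] for i in range(len(low)) for n in _LENGTHS]
--         best = 5
--         for s in cands:
--             best = min(best, _PRIORITY.get(s, 5))
--         out.append(_MESSAGES[best] if best < 5 else f"Monitor and track: {con}")
--     return out
-- ===== Notes on version B (the rewrite author's own statement) =====
-- stated objective: alternative
-- what changed: Inverts the search: instead of testing each keyword for containment in the string, B enumerates the substrings of the lowered con at the keyword lengths and looks each up in a hash table mapping keyword to rule priority, keeping the minimum priority found; the message is then picked by that priority (or the default).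
import Mathlib
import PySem

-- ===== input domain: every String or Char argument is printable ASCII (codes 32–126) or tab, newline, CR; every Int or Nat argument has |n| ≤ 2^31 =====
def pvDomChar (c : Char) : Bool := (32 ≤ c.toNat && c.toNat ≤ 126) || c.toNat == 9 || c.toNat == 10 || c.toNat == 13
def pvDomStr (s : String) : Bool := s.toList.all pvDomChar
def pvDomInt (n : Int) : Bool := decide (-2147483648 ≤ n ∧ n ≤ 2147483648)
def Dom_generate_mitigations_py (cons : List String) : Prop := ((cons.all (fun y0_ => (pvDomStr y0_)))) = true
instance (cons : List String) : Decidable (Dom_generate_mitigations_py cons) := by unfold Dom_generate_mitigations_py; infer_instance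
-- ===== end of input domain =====

-- B inverts the search: it enumerates the substrings of the lowered con at the keyword lengths and
-- looks them up in a keyword→priority hash table, taking the minimum priority (alternative algorithm, same behaviour).

-- ===== PORT A =====
def generate_mitigations_py (cons : List String) : List String :=
  cons.foldl (fun mitigations con =>
    let con_lower := PySem.Str.lower con
    if PySem.Str.isIn "time" con_lower || PySem.Str.isIn "slow" con_lower || PySem.Str.isIn "delay" con_lower then
      mitigations ++ ["Set timeout limits and have fallback ready"]
    else if PySem.Str.isIn "cost" con_lower || PySem.Str.isIn "expensive" con_lower || PySem.Str.isIn "resource" con_lower then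
      mitigations ++ ["Set budget limits and monitor resource usage"]
    else if PySem.Str.isIn "fail" con_lower || PySem.Str.isIn "error" con_lower || PySem.Str.isIn "risk" con_lower then
      mitigations ++ ["Implement retry mechanism with fallback options"]
    else if PySem.Str.isIn "complex" con_lower || PySem.Str.isIn "difficult" con_lower then
      mitigations ++ ["Break down into smaller steps with checkpoints"]
    else if PySem.Str.isIn "depend" con_lower || PySem.Str.isIn "require" con_lower then
      mitigations ++ ["Verify prerequisites before proceeding"]
    else
      mitigations ++ ["Monitor and track: " ++ con]) []

-- ===== PORT B =====
def pvPriority : PySem.Dict String Nat :=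
  PySem.Dict.ofList
    [ ("time", 0), ("slow", 0), ("delay", 0)
    , ("cost", 1), ("expensive", 1), ("resource", 1)
    , ("fail", 2), ("error", 2), ("risk", 2)
    , ("complex", 3), ("difficult", 3)
    , ("depend", 4), ("require", 4) ]

def pvMessages : List String :=
  [ "Set timeout limits and have fallback ready"
  , "Set budget limits and monitor resource usage"
  , "Implement retry mechanism with fallback options"
  , "Break down into smaller steps with checkpoints"
  , "Verify prerequisites before proceeding" ]

def pvLengths : List Int := [4, 5, 6, 7, 8, 9]

def generate_mitigations_py_alt (cons : List String) : List String :=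
  cons.foldl (fun out con =>
    let low := PySem.Str.lower con
    let cands := (PySem.List.pyRange 0 (PySem.Str.len low) 1).flatMap
      (fun i => pvLengths.map (fun n => PySem.Str.slice low (some i) (some (i + n))))
    let best := cands.foldl (fun best s => min best (pvPriority.getD s 5)) 5
    out ++ [if best < 5 then pvMessages.getD best "" else "Monitor and track: " ++ con]) []

-- ===== PRECONDITION & SPEC =====
def Spec_generate_mitigations_py (cons : List String) (out : List String) : Prop := out = generate_mitigations_py_alt cons
instance (cons : List String) (out : List String) : Decidable (Spec_generate_mitigations_py cons out) := by unfold Spec_generate_mitigations_py; infer_instance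

-- ===== CLAIM (what is proved, stated in full; the proofs are below) =====
def Claim_equal_generate_mitigations_py : Prop := ∀ (cons : List String), Dom_generate_mitigations_py cons → Spec_generate_mitigations_py cons (generate_mitigations_py cons)

-- ===== LEMMAS AND PROOFS =====

-- proof-side: the rule index A's if/elif chain selects (5 = no rule)
def pvChain (low : String) : Nat :=
  if PySem.Str.isIn "time" low || PySem.Str.isIn "slow" low || PySem.Str.isIn "delay" low then 0
  else if PySem.Str.isIn "cost" low || PySem.Str.isIn "expensive" low || PySem.Str.isIn "resource" low then 1
  else if PySem.Str.isIn "fail" low || PySem.Str.isIn "error" low || PySem.Str.isIn "risk" low then 2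
  else if PySem.Str.isIn "complex" low || PySem.Str.isIn "difficult" low then 3
  else if PySem.Str.isIn "depend" low || PySem.Str.isIn "require" low then 4
  else 5

def pvKeys : List String :=
  ["time", "slow", "delay", "cost", "expensive", "resource",
   "fail", "error", "risk", "complex", "difficult", "depend", "require"]

theorem pvChain_le_five (low : String) : pvChain low ≤ 5 := by
  unfold pvChain; split_ifs <;> omega

theorem pv_minfold_le_init {α : Type} (f : α → Nat) (l : List α) (a : Nat) :
    l.foldl (fun b s => min b (f s)) a ≤ a := by
  induction l generalizing a with
  | nil => simp
  | cons x xs ih => exact le_trans (ih (min a (f x))) (min_le_left _ _)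

theorem pv_minfold_le_of_mem {α : Type} (f : α → Nat) (l : List α) (a : Nat) {s : α}
    (h : s ∈ l) : l.foldl (fun b t => min b (f t)) a ≤ f s := by
  induction l generalizing a with
  | nil => simp at h
  | cons x xs ih =>
    simp only [List.foldl_cons]
    rcases List.mem_cons.mp h with rfl | h'
    · exact le_trans (pv_minfold_le_init f xs (min a (f s))) (min_le_right _ _)
    · exact ih (min a (f x)) h'

theorem pv_le_minfold {α : Type} (f : α → Nat) (l : List α) (a c : Nat)
    (ha : c ≤ a) (h : ∀ s ∈ l, c ≤ f s) : c ≤ l.foldl (fun b t => min b (f t)) a := by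
  induction l generalizing a with
  | nil => simpa using ha
  | cons x xs ih =>
    exact ih (min a (f x)) (le_min ha (h x List.mem_cons_self))
      (fun s hs => h s (List.mem_cons_of_mem _ hs))

theorem pvP_mk : pvPriority = PySem.Dict.mk
    [ ("time", 0), ("slow", 0), ("delay", 0)
    , ("cost", 1), ("expensive", 1), ("resource", 1)
    , ("fail", 2), ("error", 2), ("risk", 2)
    , ("complex", 3), ("difficult", 3)
    , ("depend", 4), ("require", 4) ] := by decide

-- A's chain index is ≤ the priority of any infix of low
theorem pvChain_le_getD_of_infix (low s : String) (h : s.toList <:+: low.toList) :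
    pvChain low ≤ pvPriority.getD s 5 := by
  by_cases hc : s ∈ pvKeys
  · have hin : PySem.Str.isIn s low = true := (PySem.Str.isIn_iff_infix s low).mpr h
    simp only [pvKeys, List.mem_cons, List.not_mem_nil, or_false] at hc
    rcases hc with rfl | rfl | rfl | rfl | rfl | rfl | rfl | rfl | rfl | rfl | rfl | rfl | rfl <;>
      (unfold pvChain; split_ifs <;> first | decide | simp_all)
  · have hfalse : pvPriority.contains s = false := by
      rw [PySem.Dict.contains_eq_decide_mem_keys, pvP_mk]
      simp only [PySem.Dict.keys_mk, decide_eq_false_iff_not]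
      simpa [pvKeys] using hc
    rw [PySem.Dict.getD_of_not_contains _ _ hfalse]
    exact pvChain_le_five low

-- every candidate substring is an infix of low
theorem pv_cand_infix (low : String) (s : String)
    (hs : s ∈ (PySem.List.pyRange 0 (PySem.Str.len low) 1).flatMap
      (fun i => pvLengths.map (fun n => PySem.Str.slice low (some i) (some (i + n))))) :
    s.toList <:+: low.toList := by
  simp only [List.mem_flatMap, List.mem_map] at hs
  obtain ⟨i, hi, n, hn, rfl⟩ := hs
  have hi' := PySem.List.mem_pyRange_one.mp hi
  have hn' : 0 ≤ n := by
    simp only [pvLengths, List.mem_cons, List.not_mem_nil, or_false] at hn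
    rcases hn with rfl | rfl | rfl | rfl | rfl | rfl <;> norm_num
  rw [PySem.Str.toList_slice, PySem.Chars.slice_eq_listSlice,
      PySem.List.slice_toNat _ hi'.1 (by omega)]
  exact ((List.take_prefix _ _).isInfix).trans ((List.drop_suffix _ _).isInfix)

-- if keyword k (nonempty, of a tabulated length) occurs in low, then k itself is one of the candidates
theorem pv_best_le_getD_of_isIn (low k : String)
    (hlen : (k.toList.length : Int) ∈ pvLengths) (hne : k.toList ≠ [])
    (h : PySem.Str.isIn k low = true) :
    ((PySem.List.pyRange 0 (PySem.Str.len low) 1).flatMap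
      (fun i => pvLengths.map (fun n => PySem.Str.slice low (some i) (some (i + n))))).foldl
        (fun best s => min best (pvPriority.getD s 5)) 5 ≤ pvPriority.getD k 5 := by
  obtain ⟨u, v, huv⟩ := (PySem.Str.isIn_iff_infix k low).mp h
  have hlow : low.toList.length = u.length + k.toList.length + v.length := by
    rw [← huv]; simp; omega
  have hk : 0 < k.toList.length := List.length_pos_iff.mpr hne
  have hmem : PySem.Str.slice low (some (u.length : Int)) (some ((u.length : Int) + (k.toList.length : Int)))
      ∈ (PySem.List.pyRange 0 (PySem.Str.len low) 1).flatMap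
        (fun i => pvLengths.map (fun n => PySem.Str.slice low (some i) (some (i + n)))) := by
    simp only [List.mem_flatMap, List.mem_map]
    refine ⟨(u.length : Int), ?_, (k.toList.length : Int), hlen, rfl⟩
    rw [PySem.List.mem_pyRange_one]
    simp only [PySem.Str.len_eq]
    omega
  have hslice : PySem.Str.slice low (some (u.length : Int)) (some ((u.length : Int) + (k.toList.length : Int))) = k := by
    have htl : (PySem.Str.slice low (some (u.length : Int)) (some ((u.length : Int) + (k.toList.length : Int)))).toList = k.toList := by
      rw [PySem.Str.toList_slice, PySem.Chars.slice_eq_listSlice,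
          PySem.List.slice_toNat _ (by omega) (by omega)]
      have e1 : ((u.length : Int) + (k.toList.length : Int)).toNat - ((u.length : Int)).toNat = k.toList.length := by omega
      have e2 : ((u.length : Int)).toNat = u.length := by omega
      rw [e1, e2]
      have hdrop : low.toList.drop u.length = k.toList ++ v := by
        rw [← huv, List.append_assoc, List.drop_left]
      rw [hdrop, List.take_left]
    calc PySem.Str.slice low (some (u.length : Int)) (some ((u.length : Int) + (k.toList.length : Int)))
        = String.ofList (PySem.Str.slice low (some (u.length : Int)) (some ((u.length : Int) + (k.toList.length : Int)))).toList := String.ofList_toList.symm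
      _ = String.ofList k.toList := by rw [htl]
      _ = k := String.ofList_toList
  have hle := pv_minfold_le_of_mem (fun s => pvPriority.getD s 5)
    ((PySem.List.pyRange 0 (PySem.Str.len low) 1).flatMap
      (fun i => pvLengths.map (fun n => PySem.Str.slice low (some i) (some (i + n))))) 5 hmem
  rwa [hslice] at hle

-- the minimum over candidate substrings equals A's chain index
theorem pv_best_eq_chain (low : String) :
    ((PySem.List.pyRange 0 (PySem.Str.len low) 1).flatMap
      (fun i => pvLengths.map (fun n => PySem.Str.slice low (some i) (some (i + n))))).foldl
        (fun best s => min best (pvPriority.getD s 5)) 5 = pvChain low := by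
  apply le_antisymm
  · unfold pvChain
    split_ifs with h1 h2 h3 h4 h5
    · rcases Bool.or_eq_true_iff.mp h1 with h | h
      rcases Bool.or_eq_true_iff.mp h with h | h
      · exact le_trans (pv_best_le_getD_of_isIn low "time" (by decide) (by decide) h) (by decide)
      · exact le_trans (pv_best_le_getD_of_isIn low "slow" (by decide) (by decide) h) (by decide)
      · exact le_trans (pv_best_le_getD_of_isIn low "delay" (by decide) (by decide) h) (by decide)
    · rcases Bool.or_eq_true_iff.mp h2 with h | h
      rcases Bool.or_eq_true_iff.mp h with h | h
      · exact le_trans (pv_best_le_getD_of_isIn low "cost" (by decide) (by decide) h) (by decide)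
      · exact le_trans (pv_best_le_getD_of_isIn low "expensive" (by decide) (by decide) h) (by decide)
      · exact le_trans (pv_best_le_getD_of_isIn low "resource" (by decide) (by decide) h) (by decide)
    · rcases Bool.or_eq_true_iff.mp h3 with h | h
      rcases Bool.or_eq_true_iff.mp h with h | h
      · exact le_trans (pv_best_le_getD_of_isIn low "fail" (by decide) (by decide) h) (by decide)
      · exact le_trans (pv_best_le_getD_of_isIn low "error" (by decide) (by decide) h) (by decide)
      · exact le_trans (pv_best_le_getD_of_isIn low "risk" (by decide) (by decide) h) (by decide)
    · rcases Bool.or_eq_true_iff.mp h4 with h | h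
      · exact le_trans (pv_best_le_getD_of_isIn low "complex" (by decide) (by decide) h) (by decide)
      · exact le_trans (pv_best_le_getD_of_isIn low "difficult" (by decide) (by decide) h) (by decide)
    · rcases Bool.or_eq_true_iff.mp h5 with h | h
      · exact le_trans (pv_best_le_getD_of_isIn low "depend" (by decide) (by decide) h) (by decide)
      · exact le_trans (pv_best_le_getD_of_isIn low "require" (by decide) (by decide) h) (by decide)
    · exact pv_minfold_le_init _ _ _
  · exact pv_le_minfold _ _ _ _ (pvChain_le_five low)
      (fun s hs => pvChain_le_getD_of_infix low s (pv_cand_infix low s hs))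

-- the two per-element step functions agree
theorem pv_step_eq (out : List String) (con : String) :
    (let con_lower := PySem.Str.lower con
     if PySem.Str.isIn "time" con_lower || PySem.Str.isIn "slow" con_lower || PySem.Str.isIn "delay" con_lower then
       out ++ ["Set timeout limits and have fallback ready"]
     else if PySem.Str.isIn "cost" con_lower || PySem.Str.isIn "expensive" con_lower || PySem.Str.isIn "resource" con_lower then
       out ++ ["Set budget limits and monitor resource usage"]
     else if PySem.Str.isIn "fail" con_lower || PySem.Str.isIn "error" con_lower || PySem.Str.isIn "risk" con_lower then
       out ++ ["Implement retry mechanism with fallback options"]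
     else if PySem.Str.isIn "complex" con_lower || PySem.Str.isIn "difficult" con_lower then
       out ++ ["Break down into smaller steps with checkpoints"]
     else if PySem.Str.isIn "depend" con_lower || PySem.Str.isIn "require" con_lower then
       out ++ ["Verify prerequisites before proceeding"]
     else
       out ++ ["Monitor and track: " ++ con]) =
    (let low := PySem.Str.lower con
     let cands := (PySem.List.pyRange 0 (PySem.Str.len low) 1).flatMap
       (fun i => pvLengths.map (fun n => PySem.Str.slice low (some i) (some (i + n))))
     let best := cands.foldl (fun best s => min best (pvPriority.getD s 5)) 5
     out ++ [if best < 5 then pvMessages.getD best "" else "Monitor and track: " ++ con]) := by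
  simp only
  rw [pv_best_eq_chain (PySem.Str.lower con)]
  unfold pvChain
  split_ifs <;> first | omega | simp [pvMessages]

theorem generate_mitigations_py_eq_alt (cons : List String) :
    generate_mitigations_py cons = generate_mitigations_py_alt cons := by
  unfold generate_mitigations_py generate_mitigations_py_alt
  congr 1
  funext out con
  exact pv_step_eq out con

-- ===== VERDICT (by name: the statement is the Claim_ definition above) =====
theorem generate_mitigations_py_spec : Claim_equal_generate_mitigations_py := by
  intro cons _
  unfold Spec_generate_mitigations_py
  exact generate_mitigations_py_eq_alt cons
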